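-- pv_equiv track=rewrite | github.com/snowch/vastdata_siem_demo | services/ai-agents/src/web_ui.py | parse_agent_conversation
-- ===== SOURCE A (Python) =====
-- def parse_agent_conversation(conversation):
--     """Parse the conversation string to extract individual agent outputs."""
--     lines = conversation.split('\n')
--     agent_outputs = {'triage': [], 'context': [], 'analyst': []}
--     current_agent = None
--     current_message = []
--
--     agent_mapping = {
--         'TriageSpecialist': 'triage',
--         'ContextAgent': 'context',
--         'SeniorAnalyst': 'analyst'
--     }
--
--     for line in lines:
--         # Check if line contains agent identifier
--         agent_found = None
--         for agent_name, agent_key in agent_mapping.items():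
--             if f'[{agent_name}]' in line:
--                 agent_found = agent_key
--                 break
--
--         if agent_found:
--             # Save previous agent's message if exists
--             if current_agent and current_message:
--                 message_text = '\n'.join(current_message).strip()
--                 if message_text:
--                     agent_outputs[current_agent].append(message_text)
--
--             # Start new agent message
--             current_agent = agent_found
--             current_message = [line]
--         elif current_agent and line.strip():
--             current_message.append(line)
--
--     # Don't forget the last message
--     if current_agent and current_message:
--         message_text = '\n'.join(current_message).strip()
--         if message_text:
--             agent_outputs[current_agent].append(message_text)
--
--     return agent_outputs
-- ===== SOURCE B (Python) =====
-- def _agent_key(line):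
--     if '[TriageSpecialist]' in line:
--         return 'triage'
--     if '[ContextAgent]' in line:
--         return 'context'
--     if '[SeniorAnalyst]' in line:
--         return 'analyst'
--     return None
--
--
-- def _chunks(lines):
--     """Cut lines into (agent_key, message_text) chunks at header lines."""
--     res = []
--     n = len(lines)
--     i = 0
--     while i < n and _agent_key(lines[i]) is None:
--         i += 1  # lines before the first header are ignored
--     while i < n:
--         k = _agent_key(lines[i])
--         j = i + 1
--         while j < n and _agent_key(lines[j]) is None:
--             j += 1
--         body = [l for l in lines[i + 1:j] if l.strip()]
--         res.append((k, '\n'.join([lines[i]] + body).strip()))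
--         i = j
--     return res
--
--
-- def parse_agent_conversation(conversation):
--     out = {'triage': [], 'context': [], 'analyst': []}
--     for key, text in _chunks(conversation.split('\n')):
--         if text:
--             out[key].append(text)
--     return out
-- ===== Notes on version B (the rewrite author's own statement) =====
-- stated objective: alternative
-- what changed: B replaces A's single stateful line-by-line fold (current_agent/current_message accumulator with the flush code duplicated after the loop) by a two-phase decomposition: first cut the line list into (agent, message) chunks at header lines, then fold the chunks into the dict.
import Mathlib
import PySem

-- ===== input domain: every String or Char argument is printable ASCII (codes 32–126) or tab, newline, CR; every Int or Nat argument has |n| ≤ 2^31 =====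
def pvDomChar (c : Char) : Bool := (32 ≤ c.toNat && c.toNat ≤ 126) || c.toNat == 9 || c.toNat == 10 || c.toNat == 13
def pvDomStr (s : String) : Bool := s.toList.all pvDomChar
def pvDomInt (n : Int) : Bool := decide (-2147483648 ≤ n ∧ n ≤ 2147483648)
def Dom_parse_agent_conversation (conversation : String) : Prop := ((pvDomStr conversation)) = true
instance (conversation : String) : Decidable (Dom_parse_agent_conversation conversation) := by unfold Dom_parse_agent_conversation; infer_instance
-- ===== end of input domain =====

-- B re-parses the conversation in two phases (cut into header-delimited chunks, then fold chunks
-- into the dict) instead of A's single stateful fold; same cost, different decomposition.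


-- ===== PORT A =====
-- the agent_mapping dict (iterated in insertion order)
def pvAgentMapping : List (String × String) :=
  [("TriageSpecialist", "triage"), ("ContextAgent", "context"), ("SeniorAnalyst", "analyst")]

-- the inner 'for agent_name, agent_key in agent_mapping.items(): if f'[{name}]' in line: …; break'
def pvFindAgent : List (String × String) → String → Option String
  | [], _ => none
  | (name, key) :: rest, line =>
    if PySem.Str.isIn ("[" ++ name ++ "]") line then some key else pvFindAgent rest line

-- one iteration of A's main loop; state = (agent_outputs, current_agent, current_message).
-- 'agent_outputs[current_agent].append(t)' is Dict.modify with default [] (the key is always present).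
def pvStepA (st : PySem.Dict String (List String) × Option String × List String) (line : String) :
    PySem.Dict String (List String) × Option String × List String :=
  match pvFindAgent pvAgentMapping line with
  | some k =>
    let out' :=
      match st.2.1 with
      | some c =>
        if st.2.2 ≠ [] then
          let text := PySem.Str.strip (PySem.Str.join "\n" st.2.2)
          if text ≠ "" then st.1.modify c [] (· ++ [text]) else st.1
        else st.1
      | none => st.1
    (out', some k, [line])
  | none =>
    match st.2.1 with
    | some _ =>
      if PySem.Str.strip line != "" then (st.1, st.2.1, st.2.2 ++ [line]) else st
    | none => st

def parse_agent_conversation (conversation : String) : List (String × List String) :=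
  let lines := ((PySem.Str.split? conversation "\n").getD [])
  let init : PySem.Dict String (List String) :=
    PySem.Dict.ofList [("triage", []), ("context", []), ("analyst", [])]
  let st := lines.foldl pvStepA (init, none, [])
  -- "Don't forget the last message"
  let out :=
    match st.2.1 with
    | some c =>
      if st.2.2 ≠ [] then
        let text := PySem.Str.strip (PySem.Str.join "\n" st.2.2)
        if text ≠ "" then st.1.modify c [] (· ++ [text]) else st.1
      else st.1
    | none => st.1
  out.items

-- ===== PORT B =====
def pvAltKey (line : String) : Option String :=
  if PySem.Str.isIn "[TriageSpecialist]" line then some "triage"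
  else if PySem.Str.isIn "[ContextAgent]" line then some "context"
  else if PySem.Str.isIn "[SeniorAnalyst]" line then some "analyst"
  else none

-- _chunks: scan to each header, take its body up to the next header (inner while = takeWhile/dropWhile)
def pvChunks : List String → List (String × String)
  | [] => []
  | l :: rest =>
    match pvAltKey l with
    | none => pvChunks rest
    | some k =>
      (k, PySem.Str.strip (PySem.Str.join "\n"
            (l :: (rest.takeWhile (fun x => (pvAltKey x).isNone)).filter
                    (fun x => PySem.Str.strip x != "")))) ::
        pvChunks (rest.dropWhile (fun x => (pvAltKey x).isNone))
  termination_by ls => ls.length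
  decreasing_by
  · simp
  · simp only [List.length_cons]
    exact Nat.lt_succ_of_le (List.length_dropWhile_le _ _)

def parse_agent_conversation_alt (conversation : String) : List (String × List String) :=
  let init : PySem.Dict String (List String) :=
    PySem.Dict.ofList [("triage", []), ("context", []), ("analyst", [])]
  ((pvChunks (((PySem.Str.split? conversation "\n").getD []))).foldl
      (fun out kt => if kt.2 ≠ "" then out.modify kt.1 [] (· ++ [kt.2]) else out) init).items

-- ===== PRECONDITION & SPEC =====
def Spec_parse_agent_conversation (conversation : String) (out : List (String × List String)) : Prop := out = parse_agent_conversation_alt conversation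
instance (conversation : String) (out : List (String × List String)) : Decidable (Spec_parse_agent_conversation conversation out) := by unfold Spec_parse_agent_conversation; infer_instance

-- ===== CLAIM (what is proved, stated in full; the proofs are below) =====
def Claim_equal_parse_agent_conversation : Prop := ∀ (conversation : String), Dom_parse_agent_conversation conversation → Spec_parse_agent_conversation conversation (parse_agent_conversation conversation)

-- ===== LEMMAS AND PROOFS =====

-- proof-side names for the two folds' pieces
def pvFinishA (st : PySem.Dict String (List String) × Option String × List String) :
    PySem.Dict String (List String) :=
  match st.2.1 with
  | some c =>
    if st.2.2 ≠ [] then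
      let text := PySem.Str.strip (PySem.Str.join "\n" st.2.2)
      if text ≠ "" then st.1.modify c [] (· ++ [text]) else st.1
    else st.1
  | none => st.1

def pvStepB (out : PySem.Dict String (List String)) (kt : String × String) :
    PySem.Dict String (List String) :=
  if kt.2 ≠ "" then out.modify kt.1 [] (· ++ [kt.2]) else out

theorem pvFindAgent_eq (line : String) : pvFindAgent pvAgentMapping line = pvAltKey line := by
  rfl

theorem pvStepA_none (out : PySem.Dict String (List String)) (cur : Option String)
    (msg : List String) (l : String) (h : pvAltKey l = none) :
    pvStepA (out, cur, msg) l =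
      match cur with
      | some _ => if PySem.Str.strip l != "" then (out, cur, msg ++ [l]) else (out, cur, msg)
      | none => (out, cur, msg) := by
  simp [pvStepA, pvFindAgent_eq, h]

theorem pvStepA_some (out : PySem.Dict String (List String)) (cur : Option String)
    (msg : List String) (l k : String) (h : pvAltKey l = some k) :
    pvStepA (out, cur, msg) l = (pvFinishA (out, cur, msg), some k, [l]) := by
  simp [pvStepA, pvFindAgent_eq, h, pvFinishA]

-- the main invariant: mid-chunk state (some k, msg) finishes like pvStepB on the completed
-- chunk followed by the remaining chunks
theorem pvFoldA_mid (ls : List String) (out : PySem.Dict String (List String)) (k : String)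
    (msg : List String) (hmsg : msg ≠ []) :
    pvFinishA (ls.foldl pvStepA (out, some k, msg)) =
      (pvChunks (ls.dropWhile (fun x => (pvAltKey x).isNone))).foldl pvStepB
        (pvStepB out (k, PySem.Str.strip (PySem.Str.join "\n"
          (msg ++ (ls.takeWhile (fun x => (pvAltKey x).isNone)).filter
                    (fun x => PySem.Str.strip x != ""))))) := by
  induction ls generalizing out k msg with
  | nil =>
    simp [pvChunks, pvFinishA, hmsg, pvStepB]
  | cons l rest ih =>
    cases hk : pvAltKey l with
    | none =>
      have hnh : (pvAltKey l).isNone = true := by simp [hk]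
      simp only [List.foldl_cons, pvStepA_none out (some k) msg l hk,
        List.takeWhile_cons, List.dropWhile_cons, hnh, if_pos]
      by_cases hb : PySem.Str.strip l = ""
      · have := ih out k msg hmsg
        simp [hb, this]
      · have := ih out k (msg ++ [l]) (by simp)
        simp [hb, this, List.append_assoc]
    | some k' =>
      have hfin : pvFinishA (out, some k, msg) =
          pvStepB out (k, PySem.Str.strip (PySem.Str.join "\n" msg)) := by
        simp [pvFinishA, hmsg, pvStepB]
      have hnh : (pvAltKey l).isNone = false := by simp [hk]
      simp only [List.foldl_cons, pvStepA_some out (some k) msg l k' hk,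
        List.takeWhile_cons, List.dropWhile_cons, hnh]
      rw [ih (pvFinishA (out, some k, msg)) k' [l] (by simp)]
      rw [hfin]
      simp [pvChunks, hk]

-- pre-header state (none, []) folds to B's fold over the chunks
theorem pvFoldA_main (ls : List String) (out : PySem.Dict String (List String)) :
    pvFinishA (ls.foldl pvStepA (out, none, [])) = (pvChunks ls).foldl pvStepB out := by
  induction ls generalizing out with
  | nil => simp [pvChunks, pvFinishA]
  | cons l rest ih =>
    cases hk : pvAltKey l with
    | none =>
      simp only [List.foldl_cons, pvStepA_none out none [] l hk]
      simp [pvChunks, hk, ih]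
    | some k =>
      simp only [List.foldl_cons, pvStepA_some out none [] l k hk]
      have hfin : pvFinishA (out, (none : Option String), ([] : List String)) = out := by
        simp [pvFinishA]
      rw [hfin, pvFoldA_mid rest out k [l] (by simp)]
      simp [pvChunks, hk]

-- ===== VERDICT (by name: the statement is the Claim_ definition above) =====
theorem parse_agent_conversation_spec : Claim_equal_parse_agent_conversation := by
  intro conversation _
  show parse_agent_conversation conversation = parse_agent_conversation_alt conversation
  have h1 : parse_agent_conversation conversation =
      (pvFinishA (((PySem.Str.split? conversation "\n").getD []).foldl pvStepA
        (PySem.Dict.ofList [("triage", []), ("context", []), ("analyst", [])], none, []))).items := rfl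
  have h2 : parse_agent_conversation_alt conversation =
      ((pvChunks ((PySem.Str.split? conversation "\n").getD [])).foldl pvStepB
        (PySem.Dict.ofList [("triage", []), ("context", []), ("analyst", [])])).items := rfl
  rw [h1, h2, pvFoldA_main]
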